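-- pv_equiv track=rewrite | github.com/AltriaXY/PSVWR | script_final_gai_copy.py | interval_combination_alt
-- ===== SOURCE A (Python) =====
-- def interval_combination_alt(interval_list):
--     if not interval_list:
--         return [], []
--     else:
--         interval_list.sort(key = lambda x: x[0])
--         merged_interval_list = []
--         interval_cluster_list = []
--         for interval in interval_list:
--             if not merged_interval_list:
--                 merged_interval_list.append(interval)
--                 interval_cluster_list.append([interval])
--             else:
--                 if interval[0] > merged_interval_list[-1][1]:
--                     merged_interval_list.append(interval)
--                     interval_cluster_list.append([interval])
--                 else:
--                     merged_interval_list[-1][1] = max(interval[1], merged_interval_list[-1][1])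
--                     interval_cluster_list[-1].append(interval)
--         return merged_interval_list, interval_cluster_list
-- ===== SOURCE B (Python) =====
-- def interval_combination_alt(interval_list):
--     # Staged-pass implementation: (1) prefix-maximum array of interval ends,
--     # (2) boundary flags computed from that array, (3) group by the flags,
--     # (4) finalize each group by writing its max end into its first interval.
--     # Like A, sorts interval_list in place and mutates the interval objects.
--     interval_list.sort(key=lambda x: x[0])
--     pmax = []
--     pm = None
--     for iv in interval_list:
--         pm = iv[1] if pm is None else max(pm, iv[1])
--         pmax.append(pm)
--     flags = [True] + [iv[0] > pm for iv, pm in zip(interval_list[1:], pmax)]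
--     clusters = []
--     for iv, new in zip(interval_list, flags):
--         if new:
--             clusters.append([iv])
--         else:
--             clusters[-1].append(iv)
--     merged = []
--     for c in clusters:
--         c[0][1] = max(iv[1] for iv in c)
--         merged.append(c[0])
--     return merged, clusters
-- ===== Notes on version B (the rewrite author's own statement) =====
-- stated objective: alternative
-- what changed: A makes merge decisions on the fly in a single sweep, comparing each start with the mutated end of the last merged interval; B is staged: it first builds a prefix-maximum array of ends, derives boundary flags from that array, then splits the sorted list into groups by the flags and finalizes each group's first interval with the group's max end.
-- outside the precondition, e.g. on interval_combination_alt([[5]]): A returns ([[5]], [[[5]]]), B raises IndexError; on interval_combination_alt([[1, 2], [5]]): A returns ([[1, 2], [5]], [[[1, 2]], [[5]]]), B raises IndexError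
import Mathlib
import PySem

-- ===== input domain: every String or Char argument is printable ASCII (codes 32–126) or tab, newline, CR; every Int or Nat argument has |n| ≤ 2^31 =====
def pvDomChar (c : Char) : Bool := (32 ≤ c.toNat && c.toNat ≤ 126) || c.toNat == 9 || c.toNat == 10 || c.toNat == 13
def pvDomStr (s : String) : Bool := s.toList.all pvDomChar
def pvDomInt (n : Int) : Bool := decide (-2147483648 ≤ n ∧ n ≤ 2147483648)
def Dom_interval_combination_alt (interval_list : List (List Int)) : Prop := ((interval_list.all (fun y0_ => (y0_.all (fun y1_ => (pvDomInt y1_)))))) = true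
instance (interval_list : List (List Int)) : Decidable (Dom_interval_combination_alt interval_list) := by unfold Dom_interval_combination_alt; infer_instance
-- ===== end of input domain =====

-- B replaces A's single on-the-fly merging sweep by staged passes: a prefix-maximum
-- array of ends, boundary flags derived from it, grouping by the flags, then finalizing
-- each group with its max end. Alternative decomposition, same cost; like A, the Python B
-- sorts the argument in place and mutates the interval objects (the equivalence proved
-- here is about the return value).


-- ===== PORT A =====
-- one body of A's for-loop: state = (merged_interval_list, interval_cluster_list)
def stepA (st : List (List Int) × List (List (List Int))) (interval : List Int) :
    List (List Int) × List (List (List Int)) :=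
  if st.1 = [] then (st.1 ++ [interval], st.2 ++ [[interval]])
  else if PySem.List.pyGetD interval 0 0 > PySem.List.pyGetD (st.1.getLastD []) 1 0 then
    (st.1 ++ [interval], st.2 ++ [[interval]])
  else
    let newlast := (st.1.getLastD []).set 1
      (max (PySem.List.pyGetD interval 1 0) (PySem.List.pyGetD (st.1.getLastD []) 1 0))
    (st.1.dropLast ++ [newlast],
     st.2.dropLast ++ [((st.2.getLastD []).set 0 newlast) ++ [interval]])

def interval_combination_alt (interval_list : List (List Int)) :
    List (List Int) × List (List (List Int)) :=
  if interval_list = [] then ([], [])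
  else
    (PySem.List.sorted interval_list (fun x => PySem.List.pyGetD x 0 0) false).foldl stepA ([], [])

-- ===== PORT B =====
-- one body of B's first loop: state = (pmax list, pm)
def pmaxStep (st : List Int × Option Int) (iv : List Int) : List Int × Option Int :=
  let pm := match st.2 with
    | none => PySem.List.pyGetD iv 1 0
    | some p => max p (PySem.List.pyGetD iv 1 0)
  (st.1 ++ [pm], some pm)

-- one body of B's grouping loop over zip(interval_list, flags)
def groupStep (cls : List (List (List Int))) (p : List Int × Bool) : List (List (List Int)) :=
  if p.2 then cls ++ [[p.1]]
  else cls.dropLast ++ [cls.getLastD [] ++ [p.1]]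

-- max(iv[1] for iv in c) over a nonempty cluster
def maxEndB (c : List (List Int)) : Int :=
  match c with
  | [] => 0
  | f :: rest => rest.foldl (fun a iv => max a (PySem.List.pyGetD iv 1 0)) (PySem.List.pyGetD f 1 0)

-- one body of B's final loop: c[0][1] = max end (aliasing: mutates the cluster's first interval)
def finCluster (c : List (List Int)) : List (List Int) :=
  c.set 0 ((c.headD []).set 1 (maxEndB c))

def interval_combination_alt_alt (interval_list : List (List Int)) :
    List (List Int) × List (List (List Int)) :=
  let s := PySem.List.sorted interval_list (fun x => PySem.List.pyGetD x 0 0) false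
  let pmax := (s.foldl pmaxStep ([], none)).1
  let flags := true :: ((s.drop 1).zip pmax).map
    (fun q => decide (PySem.List.pyGetD q.1 0 0 > q.2))
  let cls := (s.zip flags).foldl groupStep []
  let cls2 := cls.map finCluster
  (cls2.map (fun c => c.headD []), cls2)

-- ===== PRECONDITION & SPEC =====
-- Pre_ excludes inputs containing an interval with fewer than 2 elements: A raises
-- IndexError on almost all of them, and on the few where A still returns (the short
-- interval's end is never read by A's loop) B's natural pmax pass itself raises
-- IndexError, so those inputs are excluded rather than matched.
def Pre_interval_combination_alt (interval_list : List (List Int)) : Prop :=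
  ∀ iv ∈ interval_list, 2 ≤ iv.length
instance (interval_list : List (List Int)) : Decidable (Pre_interval_combination_alt interval_list) := by
  unfold Pre_interval_combination_alt; infer_instance

def pvWitness_interval_combination_alt : List (List Int) := [[2, 5], [1, 3], [7, 8]]

def Spec_interval_combination_alt (interval_list : List (List Int))
    (out : List (List Int) × List (List (List Int))) : Prop :=
  out = interval_combination_alt_alt interval_list
instance (interval_list : List (List Int)) (out : List (List Int) × List (List (List Int))) :
    Decidable (Spec_interval_combination_alt interval_list out) := by
  unfold Spec_interval_combination_alt; infer_instance

-- ===== CLAIM (what is proved, stated in full; the proofs are below) =====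
def Claim_equal_interval_combination_alt : Prop :=
  ∀ (interval_list : List (List Int)), Dom_interval_combination_alt interval_list →
    Pre_interval_combination_alt interval_list →
    Spec_interval_combination_alt interval_list (interval_combination_alt interval_list)

-- ===== LEMMAS AND PROOFS =====

-- B's staged passes, named for the proofs (same terms as the lets in the port)
def pmaxOf (s : List (List Int)) : List Int := (s.foldl pmaxStep ([], none)).1
def pmOf (s : List (List Int)) : Option Int := (s.foldl pmaxStep ([], none)).2
def flagsOf (s : List (List Int)) : List Bool :=
  true :: ((s.drop 1).zip (pmaxOf s)).map (fun q => decide (PySem.List.pyGetD q.1 0 0 > q.2))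
def clsOf (s : List (List Int)) : List (List (List Int)) :=
  (s.zip (flagsOf s)).foldl groupStep []

lemma pyGetD_cons_cons_one (a b : Int) (t : List Int) :
    PySem.List.pyGetD (a :: b :: t) 1 0 = b := by
  simp [PySem.List.pyGetD, PySem.List.pyGet?, PySem.List.pyIdx?]

lemma pyGetD_set_one {f : List Int} (hf : 2 ≤ f.length) (v : Int) :
    PySem.List.pyGetD (f.set 1 v) 1 0 = v := by
  match f, hf with
  | a :: b :: t, _ => simpa using pyGetD_cons_cons_one a v t

lemma set_one_getD_self {f : List Int} (hf : 2 ≤ f.length) :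
    f.set 1 (PySem.List.pyGetD f 1 0) = f := by
  match f, hf with
  | a :: b :: t, _ => rw [pyGetD_cons_cons_one]; rfl

lemma pm_append (s : List (List Int)) (x : List Int) :
    pmOf (s ++ [x]) = some (match pmOf s with
      | none => PySem.List.pyGetD x 1 0
      | some p => max p (PySem.List.pyGetD x 1 0)) := by
  unfold pmOf
  rw [List.foldl_append]
  cases h : (s.foldl pmaxStep ([], none)).2 <;> simp [pmaxStep, h]

lemma pmaxOf_append (s : List (List Int)) (x : List Int) :
    pmaxOf (s ++ [x]) = pmaxOf s ++ [(pmOf (s ++ [x])).getD 0] := by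
  unfold pmaxOf pmOf
  rw [List.foldl_append]
  cases h : (s.foldl pmaxStep ([], none)).2 <;>
    simp only [List.foldl_cons, List.foldl_nil, pmaxStep, h] <;> simp

lemma pmax_spec (s : List (List Int)) :
    (pmaxOf s).length = s.length ∧ pmOf s = (pmaxOf s).getLast? := by
  induction s using List.reverseRecOn with
  | nil => exact ⟨rfl, rfl⟩
  | append_singleton s x ih =>
    rw [pmaxOf_append, pm_append]
    refine ⟨by simp [ih.1], ?_⟩
    rw [List.getLast?_concat]
    cases h : pmOf s
    · simp
    · simp

-- appending one interval appends one flag (comparison with the running prefix max)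
lemma flags_append (s : List (List Int)) (x : List Int) (hs : s ≠ []) (p : Int)
    (hpm : pmOf s = some p) :
    flagsOf (s ++ [x]) = flagsOf s ++ [decide (PySem.List.pyGetD x 0 0 > p)] := by
  have hlen := (pmax_spec s).1
  have hlast : (pmaxOf s).getLast? = some p := by rw [← (pmax_spec s).2]; exact hpm
  have hPne : pmaxOf s ≠ [] := by
    intro h; rw [h] at hlast; simp at hlast
  have hP : pmaxOf s = (pmaxOf s).dropLast ++ [p] := by
    conv_lhs => rw [← List.dropLast_append_getLast hPne]
    rw [List.getLast_eq_iff_getLast?_eq_some hPne |>.2 hlast]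
  have hdrop : (s ++ [x]).drop 1 = s.drop 1 ++ [x] :=
    List.drop_append_of_le_length (by have := List.length_pos_of_ne_nil hs; omega)
  have hq : pmOf (s ++ [x]) = some (max p (PySem.List.pyGetD x 1 0)) := by
    rw [pm_append, hpm]
  have hlen2 : (s.drop 1).length = (pmaxOf s).dropLast.length := by
    rcases s with _ | ⟨a, t⟩
    · exact absurd rfl hs
    · simp at hlen ⊢; omega
  unfold flagsOf
  rw [hdrop, pmaxOf_append, hq]
  simp only [Option.getD_some]
  conv_lhs => rw [hP]
  rw [List.append_assoc]
  rw [show ((s.drop 1 ++ [x]).zip ((pmaxOf s).dropLast ++ ([p] ++ [max p (PySem.List.pyGetD x 1 0)])))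
      = (s.drop 1).zip (pmaxOf s).dropLast ++ [x].zip [p, max p (PySem.List.pyGetD x 1 0)]
    from List.zip_append hlen2]
  conv_rhs => rw [hP]
  rw [show ((s.drop 1).zip ((pmaxOf s).dropLast ++ [p]))
      = (s.drop 1).zip (pmaxOf s).dropLast ++ ([] : List (List Int)).zip [p]
    from by rw [← List.zip_append hlen2, List.append_nil]]
  simp

lemma flags_length (s : List (List Int)) (hs : s ≠ []) :
    (flagsOf s).length = s.length := by
  have hlen := (pmax_spec s).1
  rcases s with _ | ⟨a, t⟩
  · exact absurd rfl hs
  · unfold flagsOf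
    simp at hlen ⊢
    omega

lemma cls_append (s : List (List Int)) (x : List Int) (hs : s ≠ []) (p : Int)
    (hpm : pmOf s = some p) :
    clsOf (s ++ [x]) = groupStep (clsOf s) (x, decide (PySem.List.pyGetD x 0 0 > p)) := by
  unfold clsOf
  rw [flags_append s x hs p hpm, List.zip_append (by rw [flags_length s hs]),
      List.foldl_append]
  rfl

-- the main invariant: after any sorted prefix, A's fold state is B's grouped state
-- finalized, and B's running prefix max is max of (earlier clusters' bound m) and the
-- current cluster's max end, with m below the current cluster's first start
lemma fold_inv (s : List (List Int)) (H : ∀ iv ∈ s, 2 ≤ iv.length)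
    (hp : s.Pairwise (fun a b => PySem.List.pyGetD a 0 0 ≤ PySem.List.pyGetD b 0 0)) :
    (s = [] ∧ clsOf s = [] ∧ s.foldl stepA ([], []) = ([], [])) ∨
    (∃ cs f rest m, clsOf s = cs ++ [f :: rest] ∧
      f ∈ s ∧ 2 ≤ f.length ∧
      pmOf s = some (max m (maxEndB (f :: rest))) ∧ m < PySem.List.pyGetD f 0 0 ∧
      s.foldl stepA ([], []) =
        (((cs ++ [f :: rest]).map finCluster).map (fun c => c.headD []),
         (cs ++ [f :: rest]).map finCluster)) := by
  induction s using List.reverseRecOn with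
  | nil => left; exact ⟨rfl, rfl, rfl⟩
  | append_singleton s x ih =>
    have Hs : ∀ iv ∈ s, 2 ≤ iv.length := fun iv h => H iv (List.mem_append_left _ h)
    have Hx : 2 ≤ x.length := H x (by simp)
    have hps : s.Pairwise (fun a b => PySem.List.pyGetD a 0 0 ≤ PySem.List.pyGetD b 0 0) :=
      hp.sublist (List.sublist_append_left s [x])
    have hle : ∀ a ∈ s, PySem.List.pyGetD a 0 0 ≤ PySem.List.pyGetD x 0 0 := by
      intro a ha
      exact (List.pairwise_append.1 hp).2.2 a ha x (by simp)
    rw [List.foldl_append]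
    rcases ih Hs hps with ⟨hnil, hcls, hA⟩ | ⟨cs, f, rest, m, hcls, hf, hflen, hpm, hm, hA⟩
    · subst hnil
      right
      refine ⟨[], x, [], min (PySem.List.pyGetD x 1 0) (PySem.List.pyGetD x 0 0 - 1),
        ?_, by simp, Hx, ?_, by omega, ?_⟩
      · show clsOf ([] ++ [x]) = [] ++ [[x]]
        simp [clsOf, flagsOf, pmaxOf, pmaxStep, groupStep]
      · show pmOf ([] ++ [x]) = _
        have h1 : maxEndB [x] = PySem.List.pyGetD x 1 0 := rfl
        rw [h1, show max (min (PySem.List.pyGetD x 1 0) (PySem.List.pyGetD x 0 0 - 1))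
            (PySem.List.pyGetD x 1 0) = PySem.List.pyGetD x 1 0 from by omega]
        simp [pmOf, pmaxStep]
      · rw [hA]
        simp [stepA, finCluster, maxEndB, set_one_getD_self Hx]
    · right
      have hcls' := cls_append s x (by rintro rfl; simp at hf) _ hpm
      rw [hcls'] at *
      rw [hA]
      set hi := maxEndB (f :: rest) with hhi
      by_cases hc : PySem.List.pyGetD x 0 0 > max m hi
      · -- new cluster: x starts beyond the global prefix max
        have hchi : PySem.List.pyGetD x 0 0 > hi := lt_of_le_of_lt (le_max_right m hi) hc
        refine ⟨cs ++ [f :: rest], x, [], max m hi, ?_, by simp, Hx, ?_, hc, ?_⟩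
        · rw [hcls, groupStep, if_pos (by simpa using hc)]
        · rw [pm_append, hpm]
          show some (max (max m hi) (PySem.List.pyGetD x 1 0)) = _
          simp [maxEndB]
        · simp only [List.foldl_cons, List.foldl_nil, stepA, finCluster, List.map_append,
            List.map_cons, List.map_nil, List.headD_cons, List.set_cons_zero]
          rw [List.getLastD_concat, if_neg (by simp), List.getLastD_concat,
            pyGetD_set_one hflen, if_pos (by simpa using hchi)]
          simp [maxEndB, set_one_getD_self Hx]
      · -- merge into the current cluster
        have hfx : PySem.List.pyGetD f 0 0 ≤ PySem.List.pyGetD x 0 0 := hle f hf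
        have hchi : ¬ PySem.List.pyGetD x 0 0 > hi := by
          intro h
          exact hc (by omega)
        refine ⟨cs, f, rest ++ [x], m, ?_, List.mem_append_left _ hf, hflen, ?_, hm, ?_⟩
        · rw [hcls, groupStep, if_neg (by simpa using hc), List.dropLast_concat,
            List.getLastD_concat]
          simp
        · rw [pm_append, hpm]
          show some (max (max m hi) (PySem.List.pyGetD x 1 0)) = _
          have h2 : maxEndB (f :: (rest ++ [x])) = max hi (PySem.List.pyGetD x 1 0) := by
            simp only [maxEndB, hhi, List.foldl_append, List.foldl_cons, List.foldl_nil]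
          rw [h2, max_assoc]
        · simp only [List.foldl_cons, List.foldl_nil, stepA, finCluster, List.map_append,
            List.map_cons, List.map_nil, List.headD_cons, List.set_cons_zero]
          rw [List.getLastD_concat, if_neg (by simp), List.getLastD_concat,
            pyGetD_set_one hflen, if_neg (by simpa using hchi)]
          have h3 : maxEndB (f :: (rest ++ [x])) = max (PySem.List.pyGetD x 1 0) hi := by
            simp only [maxEndB, hhi, List.foldl_append, List.foldl_cons, List.foldl_nil]
            omega
          simp [List.set_set, h3, hhi]

-- ===== VERDICT (by name: the statement is the Claim_ definition above) =====
theorem interval_combination_alt_spec : Claim_equal_interval_combination_alt := by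
  intro l _ hpre
  unfold Spec_interval_combination_alt interval_combination_alt interval_combination_alt_alt
  by_cases hl : l = []
  · subst hl; rfl
  · rw [if_neg hl]
    have H : ∀ iv ∈ PySem.List.sorted l (fun x => PySem.List.pyGetD x 0 0) false,
        2 ≤ iv.length := by
      intro iv hiv
      exact hpre iv ((PySem.List.mem_sorted _ _ _ _).1 hiv)
    have hp := PySem.List.sorted_pairwise (xs := l) (key := fun x => PySem.List.pyGetD x 0 0)
    rcases fold_inv _ H hp with ⟨hnil, _, _⟩ | ⟨cs, f, rest, m, hcls, _, _, _, _, hA⟩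
    · exact absurd ((PySem.List.sorted_eq_nil_iff _ _ _).1 hnil) hl
    · rw [hA, ← hcls]
      rfl
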